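-- pv_equiv track=rewrite | github.com/rhpvorderman/fastqcompress | punctuation_tokenizer.py | tokenize_name
-- ===== SOURCE A (Python) =====
-- import string
-- from typing import List, Iterator, Sequence, Tuple, Iterable, BinaryIO
--
-- DECIMAL =      0b0000_0000
--
-- LOWER =        0b0000_0001
--
-- UPPER =        0b0000_0010
--
-- ZERO_PREFIX =  0b0000_0100
--
-- PUNCTUATION =  0b0000_1000
--
-- STRING = UPPER | LOWER
--
-- def classify_token(tok: str) -> int:
--     tp = 0
--     if tok[0] == '0':
--         tp |= ZERO_PREFIX
--     for char in tok:
--         if char in string.digits: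
--             tp |= DECIMAL
--         elif char in string.hexdigits:
--             if char.isupper():
--                 tp |= UPPER
--             else:
--                 tp |= LOWER
--         else:
--             return STRING
--     return tp
--
-- def tokenize_name(name: str) -> Iterator[Tuple[int, str]]:
--     start = 0
--     index = 0
--     end = len(name)
--     while index < end:
--         if name[index] in string.punctuation:
--             if index > start:
--                 token = name[start:index]
--                 yield classify_token(token), token
--             yield PUNCTUATION, name[index]
--             start = index + 1
--         index += 1
--     if index > start:
--         token = name[start:index]
--         yield classify_token(token), token
-- ===== SOURCE B (Python) =====
-- import string
-- from itertools import groupby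
--
-- DECIMAL = 0b0000_0000
-- LOWER = 0b0000_0001
-- UPPER = 0b0000_0010
-- ZERO_PREFIX = 0b0000_0100
-- PUNCTUATION = 0b0000_1000
-- STRING = UPPER | LOWER
--
--
-- def classify_token(tok: str) -> int:
--     if not all(c in string.hexdigits for c in tok):
--         return STRING
--     tp = ZERO_PREFIX if tok.startswith('0') else 0
--     if any(c.isalpha() and c.isupper() for c in tok):
--         tp |= UPPER
--     if any(c.isalpha() and c.islower() for c in tok):
--         tp |= LOWER
--     return tp
--
--
-- def tokenize_name(name: str):
--     for is_punct, group in groupby(name, key=lambda c: c in string.punctuation):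
--         if is_punct:
--             for c in group:
--                 yield PUNCTUATION, c
--         else:
--             token = ''.join(group)
--             yield classify_token(token), token
-- ===== Notes on version B (the rewrite author's own statement) =====
-- stated objective: simpler
-- what changed: Replaces the manual start/index while-loop with its slicing by itertools.groupby over runs keyed on punctuation membership, and replaces classify_token's early-return accumulator loop with all/any predicates.
import Mathlib
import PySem

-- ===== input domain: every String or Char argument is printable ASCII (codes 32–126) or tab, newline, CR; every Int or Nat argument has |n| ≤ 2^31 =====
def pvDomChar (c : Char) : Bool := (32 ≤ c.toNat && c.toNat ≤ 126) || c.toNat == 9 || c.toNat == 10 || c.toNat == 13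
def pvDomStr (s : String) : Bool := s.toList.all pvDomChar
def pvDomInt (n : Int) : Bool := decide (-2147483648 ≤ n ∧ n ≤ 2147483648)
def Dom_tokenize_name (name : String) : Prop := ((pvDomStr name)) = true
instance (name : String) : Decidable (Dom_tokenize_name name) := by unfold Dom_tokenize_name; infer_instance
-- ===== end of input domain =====

-- B replaces A's manual start/index while-loop by a groupby-style run decomposition and
-- classify_token's early-return accumulator loop by all/any predicates; objective: simpler.

-- ===== PORT A =====
-- c in string.punctuation
def pvIsPunct (c : Char) : Bool :=
  ['!','"','#','$','%','&','\'','(',')','*','+',',','-','.','/',':',';','<','=','>','?','@','[','\\',']','^','_','`','{','|','}','~'].contains c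
-- c in string.digits
def pvIsDigit (c : Char) : Bool := ['0','1','2','3','4','5','6','7','8','9'].contains c
-- c in string.hexdigits
def pvIsHex (c : Char) : Bool :=
  ['0','1','2','3','4','5','6','7','8','9','a','b','c','d','e','f','A','B','C','D','E','F'].contains c

-- classify_token's for-loop over tok with accumulator tp and early return STRING
def pvClassifyLoop : List Char → Int → Int
  | [], tp => tp
  | c :: cs, tp =>
    if pvIsDigit c then pvClassifyLoop cs (PySem.Int.bor tp 0)
    else if pvIsHex c then
      if PySem.Chars.isupper c then pvClassifyLoop cs (PySem.Int.bor tp 2)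
      else pvClassifyLoop cs (PySem.Int.bor tp 1)
    else 3

-- classify_token; tok[0] rendered as head? (A only ever calls it on a non-empty token)
def pvClassifyA (tok : List Char) : Int :=
  pvClassifyLoop tok (if tok.head? = some '0' then 4 else 0)

-- the while-loop of tokenize_name: fuel = end - index, state (start, index)
def pvTokLoop (cs : List Char) : Nat → Int → Int → List (Int × String)
  | 0, start, index =>
    if index > start then
      [(pvClassifyA (PySem.List.slice cs (some start) (some index)),
        String.ofList (PySem.List.slice cs (some start) (some index)))]
    else []
  | fuel + 1, start, index =>
    match PySem.List.pyGet? cs index with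
    | none => []   -- unreachable: index < len cs whenever fuel > 0
    | some c =>
      if pvIsPunct c then
        (if index > start then
          [(pvClassifyA (PySem.List.slice cs (some start) (some index)),
            String.ofList (PySem.List.slice cs (some start) (some index)))]
         else [])
        ++ (8, String.ofList [c]) :: pvTokLoop cs fuel (index + 1) (index + 1)
      else pvTokLoop cs fuel start (index + 1)

def tokenize_name (name : String) : List (Int × String) :=
  pvTokLoop name.toList name.toList.length 0 0

-- ===== PORT B =====
def pvIsPunctB (c : Char) : Bool :=
  ['!','"','#','$','%','&','\'','(',')','*','+',',','-','.','/',':',';','<','=','>','?','@','[','\\',']','^','_','`','{','|','}','~'].contains c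
def pvIsHexB (c : Char) : Bool :=
  ['0','1','2','3','4','5','6','7','8','9','a','b','c','d','e','f','A','B','C','D','E','F'].contains c

-- B's classify_token: all/any predicates, bits or-ed together
def pvClassifyB (tok : List Char) : Int :=
  if tok.all pvIsHexB then
    PySem.Int.bor
      (PySem.Int.bor (if tok.head? = some '0' then 4 else 0)
        (if tok.any (fun c => PySem.Chars.isalpha c && PySem.Chars.isupper c) then 2 else 0))
      (if tok.any (fun c => PySem.Chars.isalpha c && PySem.Chars.islower c) then 1 else 0)
  else 3

-- groupby(name, key = c in punctuation): peel one maximal run per step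
def pvGroups : List Char → List (Int × String)
  | [] => []
  | c :: rs =>
    if pvIsPunctB c then
      ((c :: rs).takeWhile pvIsPunctB).map (fun d => ((8 : Int), String.ofList [d]))
        ++ pvGroups ((c :: rs).dropWhile pvIsPunctB)
    else
      (pvClassifyB ((c :: rs).takeWhile (fun d => !pvIsPunctB d)),
        String.ofList ((c :: rs).takeWhile (fun d => !pvIsPunctB d)))
        :: pvGroups ((c :: rs).dropWhile (fun d => !pvIsPunctB d))
  termination_by cs => cs.length
  decreasing_by
  · rename_i h
    have h2 : (List.dropWhile pvIsPunctB (c :: rs)).length ≤ rs.length := by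
      simp only [List.dropWhile_cons, h, if_true]
      exact List.length_dropWhile_le pvIsPunctB rs
    simp only [List.length_cons]; omega
  · rename_i h
    have h2 : (List.dropWhile (fun d => !pvIsPunctB d) (c :: rs)).length ≤ rs.length := by
      simp only [List.dropWhile_cons, h, Bool.not_false, if_true]
      exact List.length_dropWhile_le (fun d => !pvIsPunctB d) rs
    simp only [List.length_cons]; omega

def tokenize_name_alt (name : String) : List (Int × String) :=
  pvGroups name.toList

-- ===== PRECONDITION & SPEC =====
def Spec_tokenize_name (name : String) (out : List (Int × String)) : Prop := out = tokenize_name_alt name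
instance (name : String) (out : List (Int × String)) : Decidable (Spec_tokenize_name name out) := by unfold Spec_tokenize_name; infer_instance

-- ===== CLAIM (what is proved, stated in full; the proofs are below) =====
def Claim_equal_tokenize_name : Prop := ∀ (name : String), Dom_tokenize_name name → Spec_tokenize_name name (tokenize_name name)

-- ===== LEMMAS AND PROOFS =====

theorem pv_any_congr {α} (l : List α) (p q : α → Bool) (h : ∀ x ∈ l, p x = q x) :
    l.any p = l.any q := by
  induction l with
  | nil => rfl
  | cons a t ih => simp [List.any_cons, h a (by simp), ih (fun x hx => h x (by simp [hx]))]

-- flag encoding of the tp accumulator (only values 0,…,7 with bit 2 = ZERO_PREFIX occur)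
def pvN (z u l : Bool) : Int :=
  (if z then 4 else 0) + (if u then 2 else 0) + (if l then 1 else 0)

theorem pv_digit_hex (c : Char) (h : pvIsDigit c = true) : pvIsHex c = true := by
  have hm : c ∈ ['0','1','2','3','4','5','6','7','8','9'] := by
    simpa [pvIsDigit] using h
  fin_cases hm <;> decide

theorem pv_hex_upper (c : Char) (h : pvIsHex c = true) :
    (PySem.Chars.isalpha c && PySem.Chars.isupper c)
      = (!pvIsDigit c && PySem.Chars.isupper c) := by
  have hm : c ∈ ['0','1','2','3','4','5','6','7','8','9','a','b','c','d','e','f','A','B','C','D','E','F'] := by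
    simpa [pvIsHex] using h
  fin_cases hm <;> decide

theorem pv_hex_lower (c : Char) (h : pvIsHex c = true) :
    (PySem.Chars.isalpha c && PySem.Chars.islower c)
      = (!pvIsDigit c && !PySem.Chars.isupper c) := by
  have hm : c ∈ ['0','1','2','3','4','5','6','7','8','9','a','b','c','d','e','f','A','B','C','D','E','F'] := by
    simpa [pvIsHex] using h
  fin_cases hm <;> decide

theorem pvClassifyLoop_spec (tok : List Char) : ∀ (z u l : Bool),
    pvClassifyLoop tok (pvN z u l) =
      if tok.all pvIsHex then
        pvN z (u || tok.any (fun c => !pvIsDigit c && PySem.Chars.isupper c))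
              (l || tok.any (fun c => !pvIsDigit c && !PySem.Chars.isupper c))
      else 3 := by
  induction tok with
  | nil => intro z u l; cases z <;> cases u <;> cases l <;> decide
  | cons c cs ih =>
    intro z u l
    by_cases hd : pvIsDigit c = true
    · have hh := pv_digit_hex c hd
      have e0 : PySem.Int.bor (pvN z u l) 0 = pvN z u l := by
        cases z <;> cases u <;> cases l <;> decide
      rw [pvClassifyLoop, if_pos hd, e0, ih z u l]
      simp only [List.all_cons, hh, Bool.true_and, List.any_cons, hd, Bool.not_true,
        Bool.false_and, Bool.false_or]
    · by_cases hh : pvIsHex c = true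
      · by_cases hu : PySem.Chars.isupper c = true
        · have e2 : PySem.Int.bor (pvN z u l) 2 = pvN z true l := by
            cases z <;> cases u <;> cases l <;> decide
          rw [pvClassifyLoop, if_neg hd, if_pos hh, if_pos hu, e2, ih z true l]
          simp only [List.all_cons, hh, Bool.true_and, List.any_cons,
            Bool.eq_false_iff.mpr hd, Bool.not_false, hu, Bool.true_or,
            Bool.or_true, Bool.not_true, Bool.false_or]
        · have e1 : PySem.Int.bor (pvN z u l) 1 = pvN z u true := by
            cases z <;> cases u <;> cases l <;> decide
          rw [pvClassifyLoop, if_neg hd, if_pos hh, if_neg hu, e1, ih z u true]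
          simp only [List.all_cons, hh, Bool.true_and, List.any_cons,
            Bool.eq_false_iff.mpr hd, Bool.not_false, Bool.eq_false_iff.mpr hu,
            Bool.and_self, Bool.false_or, Bool.true_or, Bool.or_true]
      · rw [pvClassifyLoop, if_neg hd, if_neg hh]
        simp only [List.all_cons, Bool.eq_false_iff.mpr hh, Bool.false_and, Bool.false_eq_true,
          if_false]

theorem pv_classify_eq (tok : List Char) : pvClassifyA tok = pvClassifyB tok := by
  have h0 : (if tok.head? = some '0' then (4 : Int) else 0) = pvN (tok.head? == some '0') false false := by
    by_cases hz : tok.head? = some '0' <;> simp [pvN, hz]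
  rw [pvClassifyA, h0, pvClassifyLoop_spec]
  by_cases hall : tok.all pvIsHex = true
  · have hu := pv_any_congr tok _ _ (fun x hx => pv_hex_upper x (List.all_eq_true.mp hall x hx))
    have hl := pv_any_congr tok _ _ (fun x hx => pv_hex_lower x (List.all_eq_true.mp hall x hx))
    have hallB : tok.all pvIsHexB = true := hall
    rw [pvClassifyB, if_pos hallB, if_pos hall, ← hu, ← hl]
    by_cases hz : tok.head? = some '0' <;>
      cases hU : tok.any (fun c => PySem.Chars.isalpha c && PySem.Chars.isupper c) <;>
      cases hL : tok.any (fun c => PySem.Chars.isalpha c && PySem.Chars.islower c) <;>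
      simp only [pvN, hz, if_pos, beq_iff_eq] <;>
      simp <;> decide
  · have hallB : ¬ tok.all pvIsHexB = true := hall
    rw [pvClassifyB, if_neg hallB, if_neg hall]

-- A's loop, expressed on the pending token p and the remaining input q
def pvSpecA : List Char → List Char → List (Int × String)
  | p, [] => if 0 < p.length then [(pvClassifyB p, String.ofList p)] else []
  | p, c :: rs =>
    if pvIsPunct c then
      (if 0 < p.length then [(pvClassifyB p, String.ofList p)] else [])
        ++ (8, String.ofList [c]) :: pvSpecA [] rs
    else pvSpecA (p ++ [c]) rs

theorem pvGroups_nil : pvGroups [] = [] := by rw [pvGroups]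

theorem pvGroups_punct (c : Char) (rs : List Char) (h : pvIsPunctB c = true) :
    pvGroups (c :: rs) = (8, String.ofList [c]) :: pvGroups rs := by
  rw [pvGroups]
  simp only [h, if_true, List.takeWhile_cons, List.dropWhile_cons, List.map_cons,
    List.cons_append]
  congr 1
  cases rs with
  | nil => simp [pvGroups]
  | cons d ds =>
    by_cases hd : pvIsPunctB d = true
    · rw [pvGroups]
      simp only [List.takeWhile_cons, List.dropWhile_cons, hd, if_true]
    · simp only [List.takeWhile_cons, List.dropWhile_cons, hd, Bool.false_eq_true, if_false,
        List.map_nil, List.nil_append]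

theorem pvSpecA_groups (q : List Char) : ∀ (p : List Char),
    pvSpecA p q =
      if p = [] then pvGroups q
      else (pvClassifyB (p ++ q.takeWhile (fun d => !pvIsPunctB d)),
            String.ofList (p ++ q.takeWhile (fun d => !pvIsPunctB d)))
            :: pvGroups (q.dropWhile (fun d => !pvIsPunctB d)) := by
  induction q with
  | nil =>
    intro p
    cases p with
    | nil => rw [pvSpecA]; simp [pvGroups_nil]
    | cons a t =>
      rw [pvSpecA]
      simp [pvGroups_nil]
  | cons c rs ih =>
    intro p
    by_cases hc : pvIsPunctB c = true
    · have hA : pvIsPunct c = true := hc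
      rw [pvSpecA, if_pos hA, ih [], if_pos rfl]
      cases p with
      | nil => simp [pvGroups_punct c rs hc]
      | cons a t =>
        simp only [List.length_cons, Nat.zero_lt_succ, if_true, List.takeWhile_cons, hc,
          Bool.not_true, Bool.false_eq_true, if_false, List.append_nil, List.dropWhile_cons,
          List.cons_ne_nil, pvGroups_punct c rs hc, List.singleton_append]
    · have hA : pvIsPunct c = false := Bool.eq_false_iff.mpr hc
      rw [pvSpecA, if_neg (by simp [hA]), ih (p ++ [c]),
        if_neg (by simp)]
      simp only [List.takeWhile_cons, List.dropWhile_cons, hc,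
        Bool.not_false, if_true]
      cases p with
      | nil =>
        rw [if_pos rfl, pvGroups]
        simp only [List.takeWhile_cons, List.dropWhile_cons, hc, Bool.false_eq_true, if_false,
          Bool.not_false, if_true, List.nil_append, List.singleton_append]
      | cons a t => simp

theorem pvTokLoop_eq (q : List Char) : ∀ (p₀ p : List Char) (start index : Int),
    start = p₀.length → index = p₀.length + p.length →
    pvTokLoop (p₀ ++ p ++ q) q.length start index = pvSpecA p q := by
  induction q with
  | nil =>
    intro p₀ p start index hs hi
    subst hs hi
    have hslice : PySem.List.slice (p₀ ++ p ++ []) (some (p₀.length : Int))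
        (some ((p₀.length : Int) + (p.length : Int))) = p := by
      rw [PySem.List.slice_natCast_add]
      simp
    simp only [List.length_nil, pvTokLoop, pvSpecA, hslice, pv_classify_eq]
    by_cases hp : 0 < p.length
    · rw [if_pos (by exact_mod_cast by omega), if_pos hp]
    · rw [if_neg (by omega), if_neg hp]
  | cons c rs ih =>
    intro p₀ p start index hs hi
    subst hs hi
    have hget : PySem.List.pyGet? (p₀ ++ p ++ c :: rs) ((p₀.length : Int) + (p.length : Int))
        = some c := by
      have he : ((p₀.length : Int) + (p.length : Int)) = (((p₀ ++ p).length : Nat) : Int) := by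
        simp
      rw [he, PySem.List.pyGet?_natCast, List.append_assoc]
      simp
    have hslice : PySem.List.slice (p₀ ++ p ++ c :: rs) (some (p₀.length : Int))
        (some ((p₀.length : Int) + (p.length : Int))) = p := by
      rw [PySem.List.slice_natCast_add, List.append_assoc, List.drop_left]
      simp
    simp only [List.length_cons]
    rw [pvTokLoop, hget]
    by_cases hc : pvIsPunct c = true
    · have hrec : pvTokLoop (p₀ ++ p ++ c :: rs) rs.length
          ((p₀.length : Int) + (p.length : Int) + 1) ((p₀.length : Int) + (p.length : Int) + 1)
          = pvSpecA [] rs := by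
        have hlist : p₀ ++ p ++ c :: rs = (p₀ ++ p ++ [c]) ++ [] ++ rs := by simp
        rw [hlist]
        exact ih (p₀ ++ p ++ [c]) [] _ _ (by push_cast [List.length_append, List.length_cons, List.length_nil]; omega) (by push_cast [List.length_append, List.length_cons, List.length_nil]; omega)
      simp only [hc, if_true, hrec, pvSpecA, hslice, pv_classify_eq]
      by_cases hp : 0 < p.length
      · rw [if_pos (by exact_mod_cast by omega), if_pos hp]
      · rw [if_neg (by omega), if_neg hp]
    · have hrec : pvTokLoop (p₀ ++ p ++ c :: rs) rs.length
          ((p₀.length : Int)) ((p₀.length : Int) + (p.length : Int) + 1)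
          = pvSpecA (p ++ [c]) rs := by
        have hlist : p₀ ++ p ++ c :: rs = p₀ ++ (p ++ [c]) ++ rs := by simp
        rw [hlist]
        exact ih p₀ (p ++ [c]) _ _ rfl (by push_cast [List.length_append, List.length_cons, List.length_nil]; omega)
      simp only [hc, Bool.false_eq_true, if_false, hrec]
      rw [pvSpecA, if_neg (by simp [Bool.eq_false_iff.mpr hc])]

-- ===== VERDICT (by name: the statement is the Claim_ definition above) =====
theorem tokenize_name_spec : Claim_equal_tokenize_name := by
  intro name _
  show tokenize_name name = tokenize_name_alt name
  rw [tokenize_name, tokenize_name_alt]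
  have h := pvTokLoop_eq name.toList [] [] 0 0 (by simp) (by simp)
  simp only [List.nil_append] at h
  rw [h, pvSpecA_groups name.toList [], if_pos rfl]
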